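-- pv_equiv track=rewrite | github.com/gohst9/misc | HonestorDishonest2.py | honest_or_dishonest
-- ===== SOURCE A (Python) =====
-- from itertools import product
--
-- H = "H" #Honest　正直者
--
-- D = "D" #Dishonest 嘘つき
--
-- def honest_or_dishonest(n,statements):
--     #args:
--     #   n:人数
--     #   statements:(i,state)の形式で「i番目の人がstate(嘘つきor正直)」
--     hypos = list(product(*[("H","D") for _ in range(n)])) #全通りの組み合わせの仮説を作成
--     for hypo in hypos:
--         for i,h in enumerate(hypo):
--             if h == "U":
--                 break #発言者が不親切だった場合、嘘でも真でもありうるので情報0。無視。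
--
--             who,character = change_statement(h,statements[i])
--             if hypo[who] != character:
--                 break
--             else:
--                 if i >= n-1:
--                     return True
--                 continue
--
--     return False
--
-- def change_statement(character,statement):
--     def reverse(c):
--         if c == "H":return "D"
--         if c == "D":return "H"
--     #発言者の人格が正直ものかどうかに応じてstatementsをして返す
--     if  character == H:
--         return statement
--     elif character == D:
--         return [statement[0],reverse(statement[1])]
--     else:
--         return statement #よく分からんからそのまま返しとこ
-- ===== SOURCE B (Python) =====
-- def honest_or_dishonest(n, statements):
--     # Parity quick-find: comp[x] = (root, parity of x relative to root).
--     # Each statement i gives the constraint c[who] = c[i] XOR (char == "D").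
--     if n < 1:
--         return False  # A reports failure for an empty population; keep that behaviour
--     comp = [(i, False) for i in range(n)]
--     for i in range(n):
--         who, char = statements[i]
--         if char == "H":
--             p = False
--         elif char == "D":
--             p = True
--         else:
--             return False  # unsatisfiable statement
--         r1, p1 = comp[i]
--         r2, p2 = comp[who]
--         if r1 == r2:
--             if (p1 != p2) != p:
--                 return False
--         else:
--             delta = p1 != (p2 != p)
--             comp = [(r1, px != delta) if rx == r2 else (rx, px) for (rx, px) in comp]
--     return True
-- ===== Notes on version B (the rewrite author's own statement) =====
-- stated objective: faster
-- what changed: A enumerates all 2^n honesty hypotheses and tests each against every statement; B makes one pass over the n statements maintaining a parity quick-find table (root, parity-to-root per person) and reports inconsistency immediately.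
-- outside the precondition, e.g. on honest_or_dishonest(2, [(0, 'X'), (5, 'H')]): A returns False, B returns False
import Mathlib
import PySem

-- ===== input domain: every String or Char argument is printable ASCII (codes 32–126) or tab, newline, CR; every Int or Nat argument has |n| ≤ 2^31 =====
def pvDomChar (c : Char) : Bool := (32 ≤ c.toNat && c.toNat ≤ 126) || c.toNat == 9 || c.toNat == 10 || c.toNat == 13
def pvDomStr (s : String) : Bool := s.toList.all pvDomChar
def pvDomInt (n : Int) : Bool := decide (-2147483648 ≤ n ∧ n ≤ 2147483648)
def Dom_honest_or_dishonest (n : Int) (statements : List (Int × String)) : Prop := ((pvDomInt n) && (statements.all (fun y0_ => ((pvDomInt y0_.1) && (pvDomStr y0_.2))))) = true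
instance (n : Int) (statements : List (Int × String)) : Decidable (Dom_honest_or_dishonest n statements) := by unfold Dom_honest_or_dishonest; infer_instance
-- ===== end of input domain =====

-- B replaces A's exhaustive search over all 2^n honesty hypotheses by one parity
-- quick-find pass over the n statements (objective: faster); A = B is proved on Pre_.

-- ===== PORT A =====
def pvReverse (c : String) : Option String :=
  if c == "H" then some "D" else if c == "D" then some "H" else none

def change_statement (character : String) (statement : Int × String) : Int × Option String :=
  if character == "H" then (statement.1, some statement.2)
  else if character == "D" then (statement.1, pvReverse statement.2)
  else (statement.1, some statement.2)

-- list(product(*[("H","D") for _ in range(n)])), first coordinate varying slowest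
def pvProductHD : Nat → List (List String)
  | 0 => [[]]
  | k + 1 => ["H", "D"].flatMap (fun h => (pvProductHD k).map (fun t => h :: t))

-- the inner 'for i,h in enumerate(hypo)' loop; false = break/fall through, true = 'return True'
def pvInner (n : Int) (statements : List (Int × String)) (hypo : List String) :
    List String → Nat → Bool
  | [], _ => false
  | h :: rest, i =>
    if h == "U" then false
    else
      match PySem.List.pyGet? statements (i : Int) with
      | none => false   -- statements[i] raises IndexError (outside Pre_)
      | some st =>
        let wc := change_statement h st
        match PySem.List.pyGet? hypo wc.1 with
        | none => false -- hypo[who] raises IndexError (outside Pre_)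
        | some hw =>
          if (some hw == wc.2) = false then false
          else if (i : Int) ≥ n - 1 then true
          else pvInner n statements hypo rest (i + 1)

def pvOuter (n : Int) (statements : List (Int × String)) : List (List String) → Bool
  | [] => false
  | hypo :: rest =>
    if pvInner n statements hypo hypo 0 then true else pvOuter n statements rest

def honest_or_dishonest (n : Int) (statements : List (Int × String)) : Bool :=
  pvOuter n statements (pvProductHD n.toNat)

-- ===== PORT B =====
-- parity quick-find loop: comp[x] = (root of x, parity of x relative to its root)
def pvBLoop (statements : List (Int × String)) :
    List (Int × Bool) → Nat → Nat → Bool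
  | _, _, 0 => true
  | comp, i, fuel + 1 =>
    match PySem.List.pyGet? statements (i : Int) with
    | none => false   -- statements[i] raises IndexError (outside Pre_)
    | some st =>
      match (if st.2 == "H" then some false else if st.2 == "D" then some true else none) with
      | none => false  -- unsatisfiable statement character
      | some p =>
        match PySem.List.pyGet? comp (i : Int), PySem.List.pyGet? comp st.1 with
        | some c1, some c2 =>
          if c1.1 == c2.1 then
            if (c1.2 != c2.2) != p then false
            else pvBLoop statements comp (i + 1) fuel
          else
            pvBLoop statements
              (comp.map (fun rp =>
                if rp.1 == c2.1 then (c1.1, rp.2 != (c1.2 != (c2.2 != p))) else rp))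
              (i + 1) fuel
        | _, _ => false  -- comp[who] raises IndexError (outside Pre_)

def honest_or_dishonest_alt (n : Int) (statements : List (Int × String)) : Bool :=
  if n < 1 then false
  else pvBLoop statements ((List.range n.toNat).map (fun i : Nat => ((i : Int), false))) 0 n.toNat

-- ===== PRECONDITION & SPEC =====
-- Pre_ excludes inputs with fewer than n statements, or whose first n statements name a
-- speaker outside [-n, n): on those A's exhaustive search raises IndexError on some
-- hypothesis branch, or returns False only because every branch happens to break before
-- reaching the malformed statement.
def Pre_honest_or_dishonest (n : Int) (statements : List (Int × String)) : Prop :=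
  n.toNat ≤ statements.length ∧
    ∀ st ∈ statements.take n.toNat, -n ≤ st.1 ∧ st.1 < n

instance (n : Int) (statements : List (Int × String)) :
    Decidable (Pre_honest_or_dishonest n statements) := by
  unfold Pre_honest_or_dishonest; infer_instance

def pvWitness_honest_or_dishonest : Int × (List (Int × String)) := (1, [(0, "H")])

def Spec_honest_or_dishonest (n : Int) (statements : List (Int × String)) (out : Bool) : Prop :=
  out = honest_or_dishonest_alt n statements

instance (n : Int) (statements : List (Int × String)) (out : Bool) :
    Decidable (Spec_honest_or_dishonest n statements out) := by
  unfold Spec_honest_or_dishonest; infer_instance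

-- ===== CLAIM (what is proved, stated in full; the proofs are below) =====
def Claim_equal_honest_or_dishonest : Prop := ∀ (n : Int) (statements : List (Int × String)), Dom_honest_or_dishonest n statements → Pre_honest_or_dishonest n statements → Spec_honest_or_dishonest n statements (honest_or_dishonest n statements)

-- ===== LEMMAS AND PROOFS =====

-- proof-layer abbreviations
def pvIdx (len : Nat) (i : Int) : Nat := if 0 ≤ i then i.toNat else (i + len).toNat

def pvSt (statements : List (Int × String)) (i : Nat) : Int × String := statements.getD i (0, "")

def pvGood (statements : List (Int × String)) (i : Nat) : Prop :=
  (pvSt statements i).2 = "H" ∨ (pvSt statements i).2 = "D"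

def pvP (statements : List (Int × String)) (i : Nat) : Bool := (pvSt statements i).2 == "D"

def pvT (n : Int) (statements : List (Int × String)) (i : Nat) : Nat :=
  pvIdx n.toNat (pvSt statements i).1

-- the parity constraint of statement i for boolean assignment c (true = dishonest)
def pvSatC (n : Int) (statements : List (Int × String)) (c : List Bool) (i : Nat) : Prop :=
  pvGood statements i ∧
    c.getD (pvT n statements i) false = ((c.getD i false) != pvP statements i)

def pvSolvable (n : Int) (statements : List (Int × String)) : Prop :=
  ∃ c : List Bool, c.length = n.toNat ∧ ∀ i < n.toNat, pvSatC n statements c i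

-- generic helpers --------------------------------------------------------------

theorem pvGetD_map_of_lt {α β : Type} (f : α → β) (l : List α) (j : Nat) (h : j < l.length)
    (d : β) (d' : α) : (l.map f).getD j d = f (l.getD j d') := by
  simp [List.getD, List.getElem?_eq_getElem, h]

theorem pvIdx_lt (len : Nat) (i : Int) (h1 : -(len : Int) ≤ i) (h2 : i < (len : Int)) :
    pvIdx len i < len := by
  unfold pvIdx; split <;> omega

theorem pvPyGet?_inrange {α : Type} (xs : List α) (i : Int) (h1 : -(xs.length : Int) ≤ i)
    (h2 : i < (xs.length : Int)) :
    PySem.List.pyGet? xs i = xs[pvIdx xs.length i]? := by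
  by_cases h0 : 0 ≤ i
  · rw [PySem.List.pyGet?_of_nonneg _ h0]
    simp [pvIdx, h0]
  · have hkpos : 0 < (-i).toNat := by omega
    have hkle : (-i).toNat ≤ xs.length := by omega
    have hk : i = -(((-i).toNat : Nat) : Int) := by omega
    rw [hk, PySem.List.pyGet?_neg_natCast xs (-i).toNat hkpos hkle]
    congr 1
    unfold pvIdx
    split <;> omega

theorem pvGetD_inrange {α : Type} [Inhabited α] (xs : List α) (i : Int)
    (h1 : -(xs.length : Int) ≤ i) (h2 : i < (xs.length : Int)) (d : α) :
    PySem.List.pyGet? xs i = some (xs.getD (pvIdx xs.length i) d) := by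
  rw [pvPyGet?_inrange xs i h1 h2]
  have hlt := pvIdx_lt xs.length i h1 h2
  rw [List.getElem?_eq_getElem hlt, List.getD_eq_getElem _ _ hlt]

-- bool algebra facts (used by the quick-find invariants)
theorem pvBne1 (a b p : Bool) (h : (a != b) = p) : b = (a != p) := by
  revert h; cases a <;> cases b <;> cases p <;> decide

theorem pvBne2 (ck ct p1 p2 p : Bool) (h1 : (ck != p1) = (ct != p2)) (h2 : ct = (ck != p)) :
    (p1 != p2) = p := by
  revert h1 h2; cases ck <;> cases ct <;> cases p1 <;> cases p2 <;> cases p <;> decide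

theorem pvBne4 (a b d : Bool) : ((a != d) != (b != d)) = (a != b) := by
  cases a <;> cases b <;> cases d <;> decide

theorem pvBne5 (p1 p2 p : Bool) : (p1 != (p2 != (p1 != (p2 != p)))) = p := by
  cases p1 <;> cases p2 <;> cases p <;> decide

theorem pvBne6 (cx px cy py d : Bool) (h : (cx != px) = (cy != py)) :
    (cx != (px != d)) = (cy != (py != d)) := by
  revert h; cases cx <;> cases px <;> cases cy <;> cases py <;> cases d <;> decide

theorem pvBne7 (cx px ct cy py ck p1 p2 p : Bool)
    (h1 : (cx != px) = (ct != p2)) (h2 : (cy != py) = (ck != p1)) (h3 : ct = (ck != p)) :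
    (cx != (px != (p1 != (p2 != p)))) = (cy != py) := by
  revert h1 h2 h3
  cases cx <;> cases px <;> cases ct <;> cases cy <;> cases py <;> cases ck <;>
    cases p1 <;> cases p2 <;> cases p <;> decide

-- facts from Pre_ --------------------------------------------------------------

theorem pvStMem (statements : List (Int × String)) (n : Int) (k : Nat)
    (hlen : n.toNat ≤ statements.length) (hk : k < n.toNat) :
    pvSt statements k ∈ statements.take n.toNat := by
  have hk' : k < statements.length := by omega
  have hkt : k < (statements.take n.toNat).length := by simp; omega
  have : pvSt statements k = (statements.take n.toNat)[k] := by
    rw [pvSt, List.getD_eq_getElem _ _ hk', List.getElem_take]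
  rw [this]
  exact List.getElem_mem hkt

theorem pvWhoBound (n : Int) (statements : List (Int × String))
    (hp : Pre_honest_or_dishonest n statements) (k : Nat) (hk : k < n.toNat) :
    -n ≤ (pvSt statements k).1 ∧ (pvSt statements k).1 < n :=
  hp.2 _ (pvStMem statements n k hp.1 hk)

theorem pvT_lt (n : Int) (statements : List (Int × String))
    (hp : Pre_honest_or_dishonest n statements) (hn : 1 ≤ n) (k : Nat) (hk : k < n.toNat) :
    pvT n statements k < n.toNat := by
  have hb := pvWhoBound n statements hp k hk
  have hcast : ((n.toNat : Int)) = n := Int.toNat_of_nonneg (by omega)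
  exact pvIdx_lt _ _ (by omega) (by omega)

theorem pvStGet (n : Int) (statements : List (Int × String))
    (hp : Pre_honest_or_dishonest n statements) (k : Nat) (hk : k < n.toNat) :
    PySem.List.pyGet? statements (k : Int) = some (pvSt statements k) := by
  have hk' : k < statements.length := by have := hp.1; omega
  rw [PySem.List.pyGet?_natCast, List.getElem?_eq_getElem hk', pvSt,
    List.getD_eq_getElem _ _ hk']

-- A-side ----------------------------------------------------------------------

theorem pvOuter_eq_any (n : Int) (statements : List (Int × String)) (l : List (List String)) :
    pvOuter n statements l = l.any (fun h => pvInner n statements h h 0) := by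
  induction l with
  | nil => rfl
  | cons a t ih =>
    cases h : pvInner n statements a a 0 <;> simp [pvOuter, h, ih]

theorem pvMem_productHD (k : Nat) (hypo : List String) :
    hypo ∈ pvProductHD k ↔ hypo.length = k ∧ ∀ s ∈ hypo, s = "H" ∨ s = "D" := by
  induction k generalizing hypo with
  | zero =>
    simp only [pvProductHD, List.mem_singleton]
    constructor
    · rintro rfl; simp
    · rintro ⟨h1, _⟩; exact List.eq_nil_of_length_eq_zero h1
  | succ k ih =>
    simp only [pvProductHD, List.mem_flatMap, List.mem_map]
    constructor
    · rintro ⟨h, hh, t, ht, rfl⟩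
      have := (ih t).mp ht
      simp only [List.mem_cons] at hh ⊢
      refine ⟨by simp [this.1], ?_⟩
      rintro s (rfl | hs)
      · rcases hh with rfl | rfl | h'
        · exact Or.inl rfl
        · exact Or.inr rfl
        · simp at h'
      · exact this.2 s hs
    · rintro ⟨h1, h2⟩
      cases hypo with
      | nil => simp at h1
      | cons s t =>
        refine ⟨s, ?_, t, (ih t).mpr ⟨by simpa using h1, fun x hx => h2 x (by simp [hx])⟩, rfl⟩
        rcases h2 s (by simp) with rfl | rfl <;> simp

theorem pvChange_fst (c : String) (s : Int × String) : (change_statement c s).1 = s.1 := by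
  unfold change_statement; split_ifs <;> rfl

theorem pvCheck_iff (ch h hw : String) (w : Int)
    (hh : h = "H" ∨ h = "D") (hhw : hw = "H" ∨ hw = "D") :
    ((some hw == (change_statement h (w, ch)).2) = true)
      ↔ ((ch = "H" ∨ ch = "D") ∧ ((hw == "D") = ((h == "D") != (ch == "D")))) := by
  rcases hh with rfl | rfl <;> rcases hhw with rfl | rfl <;>
    by_cases h1 : ch = "H" <;> by_cases h2 : ch = "D" <;>
      simp_all [change_statement, pvReverse, beq_iff_eq] <;>
        try first
          | exact fun hcc => h1 hcc.symm
          | exact fun hcc => h2 hcc.symm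

-- the per-index check of A's inner loop, as a constraint on hypo's boolean image
theorem pvStep_iff (n : Int) (statements : List (Int × String))
    (hp : Pre_honest_or_dishonest n statements) (hn : 1 ≤ n)
    (hypo : List String) (hlen : hypo.length = n.toNat)
    (hHD : ∀ s ∈ hypo, s = "H" ∨ s = "D") (k : Nat) (hk : k < n.toNat) :
    ((some (hypo.getD (pvT n statements k) "") ==
        (change_statement (hypo.getD k "") (pvSt statements k)).2) = true)
      ↔ pvSatC n statements (hypo.map (fun s => s == "D")) k := by
  have hkh : k < hypo.length := by omega
  have hth : pvT n statements k < hypo.length := by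
    rw [hlen]; exact pvT_lt n statements hp hn k hk
  have hmem1 : hypo.getD k "" ∈ hypo := by
    rw [List.getD_eq_getElem _ _ hkh]; exact List.getElem_mem hkh
  have hmem2 : hypo.getD (pvT n statements k) "" ∈ hypo := by
    rw [List.getD_eq_getElem _ _ hth]; exact List.getElem_mem hth
  have hc1 : (hypo.map (fun s => s == "D")).getD k false = (hypo.getD k "" == "D") :=
    pvGetD_map_of_lt _ _ _ hkh _ _
  have hc2 : (hypo.map (fun s => s == "D")).getD (pvT n statements k) false
      = (hypo.getD (pvT n statements k) "" == "D") :=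
    pvGetD_map_of_lt _ _ _ hth _ _
  rw [show pvSt statements k = ((pvSt statements k).1, (pvSt statements k).2) from rfl,
    pvCheck_iff _ _ _ _ (hHD _ hmem1) (hHD _ hmem2)]
  unfold pvSatC pvGood pvP
  rw [hc1, hc2]

theorem pvInner_iff (n : Int) (statements : List (Int × String))
    (hp : Pre_honest_or_dishonest n statements) (hn : 1 ≤ n)
    (hypo : List String) (hlen : hypo.length = n.toNat)
    (hHD : ∀ s ∈ hypo, s = "H" ∨ s = "D") :
    ∀ m k, n.toNat = k + m + 1 →
      (pvInner n statements hypo (hypo.drop k) k = true ↔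
        ∀ i, k ≤ i → i < n.toNat → pvSatC n statements (hypo.map (fun s => s == "D")) i) := by
  have hcast : ((n.toNat : Int)) = n := Int.toNat_of_nonneg (by omega)
  intro m
  induction m with
  | zero =>
    intro k hk
    have hkN : k < n.toNat := by omega
    have hkh : k < hypo.length := by omega
    have hdrop : hypo.drop k = hypo.getD k "" :: hypo.drop (k + 1) := by
      rw [List.getD_eq_getElem _ _ hkh]
      exact List.drop_eq_getElem_cons hkh
    have hU : ((hypo.getD k "" : String) == "U") = false := by
      have hmem : hypo.getD k "" ∈ hypo := by
        rw [List.getD_eq_getElem _ _ hkh]; exact List.getElem_mem hkh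
      rcases hHD _ hmem with h | h <;> rw [h] <;> decide
    have hst := pvStGet n statements hp k hkN
    have hb := pvWhoBound n statements hp k hkN
    have hhg : PySem.List.pyGet? hypo (change_statement (hypo.getD k "") (pvSt statements k)).1
        = some (hypo.getD (pvT n statements k) "") := by
      rw [pvChange_fst]
      have := pvGetD_inrange hypo (pvSt statements k).1 (by rw [hlen]; omega)
        (by rw [hlen]; omega) ""
      rw [this]
      congr 1
      unfold pvT
      rw [hlen]
    rw [hdrop]
    simp only [pvInner, hU, Bool.false_eq_true, if_false, hst, hhg]
    cases hchk : (some (hypo.getD (pvT n statements k) "") ==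
        (change_statement (hypo.getD k "") (pvSt statements k)).2) with
    | false =>
      rw [if_pos rfl]
      simp only [Bool.false_eq_true, false_iff]
      intro hall
      have := (pvStep_iff n statements hp hn hypo hlen hHD k hkN).mpr (hall k le_rfl hkN)
      rw [hchk] at this
      simp at this
    | true =>
      rw [if_neg (by simp), if_pos (show ((k : Int) ≥ n - 1) by omega)]
      constructor
      · intro _ i hki hiN
        have : i = k := by omega
        subst this
        exact (pvStep_iff n statements hp hn hypo hlen hHD i hiN).mp hchk
      · intro _; rfl
  | succ m ih =>
    intro k hk
    have hkN : k < n.toNat := by omega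
    have hkh : k < hypo.length := by omega
    have hdrop : hypo.drop k = hypo.getD k "" :: hypo.drop (k + 1) := by
      rw [List.getD_eq_getElem _ _ hkh]
      exact List.drop_eq_getElem_cons hkh
    have hU : ((hypo.getD k "" : String) == "U") = false := by
      have hmem : hypo.getD k "" ∈ hypo := by
        rw [List.getD_eq_getElem _ _ hkh]; exact List.getElem_mem hkh
      rcases hHD _ hmem with h | h <;> rw [h] <;> decide
    have hst := pvStGet n statements hp k hkN
    have hb := pvWhoBound n statements hp k hkN
    have hhg : PySem.List.pyGet? hypo (change_statement (hypo.getD k "") (pvSt statements k)).1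
        = some (hypo.getD (pvT n statements k) "") := by
      rw [pvChange_fst]
      have := pvGetD_inrange hypo (pvSt statements k).1 (by rw [hlen]; omega)
        (by rw [hlen]; omega) ""
      rw [this]
      congr 1
      unfold pvT
      rw [hlen]
    have hge : ¬ ((k : Int) ≥ n - 1) := by omega
    rw [hdrop]
    simp only [pvInner, hU, Bool.false_eq_true, if_false, hst, hhg]
    cases hchk : (some (hypo.getD (pvT n statements k) "") ==
        (change_statement (hypo.getD k "") (pvSt statements k)).2) with
    | false =>
      rw [if_pos rfl]
      simp only [Bool.false_eq_true, false_iff]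
      intro hall
      have := (pvStep_iff n statements hp hn hypo hlen hHD k hkN).mpr (hall k le_rfl hkN)
      rw [hchk] at this
      simp at this
    | true =>
      rw [if_neg (by simp), if_neg hge, ih (k + 1) (by omega)]
      constructor
      · intro hall i hki hiN
        rcases Nat.eq_or_lt_of_le hki with heq | hlt
        · subst i
          exact (pvStep_iff n statements hp hn hypo hlen hHD k hiN).mp hchk
        · exact hall i hlt hiN
      · intro hall i hki hiN
        exact hall i (by omega) hiN

theorem pvA_iff (n : Int) (statements : List (Int × String))
    (hp : Pre_honest_or_dishonest n statements) (hn : 1 ≤ n) :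
    honest_or_dishonest n statements = true ↔ pvSolvable n statements := by
  unfold honest_or_dishonest
  rw [pvOuter_eq_any, List.any_eq_true]
  constructor
  · rintro ⟨hypo, hmem, hinner⟩
    obtain ⟨hlen, hHD⟩ := (pvMem_productHD _ _).mp hmem
    have := (pvInner_iff n statements hp hn hypo hlen hHD (n.toNat - 1) 0 (by omega)).mp
      (by simpa using hinner)
    exact ⟨hypo.map (fun s => s == "D"), by simp [hlen], fun i hi => this i (by omega) hi⟩
  · rintro ⟨c, hclen, hsat⟩
    refine ⟨c.map (fun b => if b then "D" else "H"), ?_, ?_⟩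
    · apply (pvMem_productHD _ _).mpr
      constructor
      · simp [hclen]
      · intro s hs
        simp only [List.mem_map] at hs
        obtain ⟨b, _, rfl⟩ := hs
        cases b <;> simp
    · have hmap : (c.map (fun b => if b then "D" else "H")).map (fun s => s == "D") = c := by
        rw [List.map_map]
        have : ((fun s => s == "D") ∘ fun b => if b then ("D" : String) else "H") = id := by
          funext b; cases b <;> decide
        rw [this, List.map_id]
      have hiff := pvInner_iff n statements hp hn (c.map (fun b => if b then "D" else "H"))
        (by simp [hclen]) (by
          intro s hs
          simp only [List.mem_map] at hs
          obtain ⟨b, _, rfl⟩ := hs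
          cases b <;> simp) (n.toNat - 1) 0 (by omega)
      rw [hmap] at hiff
      simpa using hiff.mpr (fun i _ hi => hsat i hi)

-- B-side ----------------------------------------------------------------------

def pvD0 : Int × Bool := (0, false)

def pvRoot (comp : List (Int × Bool)) (x : Nat) : Int := (comp.getD x pvD0).1

def pvPar (comp : List (Int × Bool)) (x : Nat) : Bool := (comp.getD x pvD0).2

def pvCompat (n : Int) (comp : List (Int × Bool)) (c : List Bool) : Prop :=
  ∀ x y, x < n.toNat → y < n.toNat → pvRoot comp x = pvRoot comp y →
    ((c.getD x false) != pvPar comp x) = ((c.getD y false) != pvPar comp y)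

def pvHolds (n : Int) (statements : List (Int × String)) (comp : List (Int × Bool))
    (i : Nat) : Prop :=
  pvRoot comp i = pvRoot comp (pvT n statements i) ∧
    (pvPar comp i != pvPar comp (pvT n statements i)) = pvP statements i

theorem pvBLoop_iff (n : Int) (statements : List (Int × String))
    (hp : Pre_honest_or_dishonest n statements) (hn : 1 ≤ n) :
    ∀ (fuel k : Nat) (comp : List (Int × Bool)), k + fuel = n.toNat →
      comp.length = n.toNat →
      (∀ i, i < k → pvGood statements i ∧ pvHolds n statements comp i) →
      (∀ c : List Bool, c.length = n.toNat →
        (∀ i, i < k → pvSatC n statements c i) → pvCompat n comp c) →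
      (pvBLoop statements comp k fuel = true ↔ pvSolvable n statements) := by
  have hcast : ((n.toNat : Int)) = n := Int.toNat_of_nonneg (by omega)
  intro fuel
  induction fuel with
  | zero =>
    intro k comp hk hlen hI2 _
    have hkN : k = n.toNat := by omega
    subst hkN
    simp only [pvBLoop, true_iff]
    refine ⟨comp.map Prod.snd, by simp [hlen], ?_⟩
    intro i hi
    have h2 := hI2 i hi
    have hgood := h2.1
    obtain ⟨hroots, hpars⟩ := h2.2
    have hti : pvT n statements i < n.toNat := pvT_lt n statements hp hn i hi
    unfold pvSatC
    refine ⟨hgood, ?_⟩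
    rw [pvGetD_map_of_lt Prod.snd comp _ (by omega) _ pvD0,
        pvGetD_map_of_lt Prod.snd comp _ (by omega) _ pvD0]
    exact pvBne1 _ _ _ hpars
  | succ fuel ih =>
    intro k comp hk hlen hI2 hI3
    have hkN : k < n.toNat := by omega
    have hst := pvStGet n statements hp k hkN
    have hb := pvWhoBound n statements hp k hkN
    have htk : pvT n statements k < n.toNat := pvT_lt n statements hp hn k hkN
    have hget1 : PySem.List.pyGet? comp (k : Int) = some (comp.getD k pvD0) := by
      rw [PySem.List.pyGet?_natCast, List.getElem?_eq_getElem (by omega),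
        List.getD_eq_getElem _ _ (by omega)]
    have hget2 : PySem.List.pyGet? comp (pvSt statements k).1
        = some (comp.getD (pvT n statements k) pvD0) := by
      have := pvGetD_inrange comp (pvSt statements k).1 (by rw [hlen]; omega)
        (by rw [hlen]; omega) pvD0
      rw [this]
      congr 1
      unfold pvT
      rw [hlen]
    simp only [pvBLoop, hst, hget1, hget2]
    by_cases hgood : (pvSt statements k).2 = "H" ∨ (pvSt statements k).2 = "D"
    · have hmatch : (if ((pvSt statements k).2 == "H") then some false
          else if ((pvSt statements k).2 == "D") then some true else none)
          = some (pvP statements k) := by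
        rcases hgood with h | h <;> simp [pvP, h]
      simp only [hmatch]
      by_cases hr : pvRoot comp k = pvRoot comp (pvT n statements k)
      · have hbeq : ((comp.getD k pvD0).1 == (comp.getD (pvT n statements k) pvD0).1) = true := by
          unfold pvRoot at hr
          exact beq_iff_eq.mpr hr
        rw [hbeq, if_pos rfl]
        by_cases hconf : ((comp.getD k pvD0).2 != (comp.getD (pvT n statements k) pvD0).2)
            = pvP statements k
        · have hc' : (((comp.getD k pvD0).2 != (comp.getD (pvT n statements k) pvD0).2)
              != pvP statements k) = false := by
            rw [hconf]; simp
          rw [hc', if_neg (by simp)]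
          apply ih (k + 1) comp (by omega) hlen
          · intro i hi
            rcases Nat.lt_succ_iff_lt_or_eq.mp hi with hi' | rfl
            · exact hI2 i hi'
            · exact ⟨hgood, hr, hconf⟩
          · intro c hclen hsat
            exact hI3 c hclen (fun i hi => hsat i (by omega))
        · have hc' : (((comp.getD k pvD0).2 != (comp.getD (pvT n statements k) pvD0).2)
              != pvP statements k) = true := by
            cases hx : ((comp.getD k pvD0).2 != (comp.getD (pvT n statements k) pvD0).2) <;>
              cases hy : pvP statements k <;> simp_all
          rw [hc', if_pos rfl]
          simp only [Bool.false_eq_true, false_iff]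
          rintro ⟨c, hclen, hsat⟩
          have hcompat := hI3 c hclen (fun i hi => hsat i (by omega)) k
            (pvT n statements k) hkN htk hr
          have hsk := hsat k hkN
          unfold pvSatC at hsk
          exact hconf (pvBne2 _ _ _ _ _ hcompat hsk.2)
      · have hbeq : ((comp.getD k pvD0).1 == (comp.getD (pvT n statements k) pvD0).1)
            = false := by
          unfold pvRoot at hr
          exact beq_eq_false_iff_ne.mpr hr
        rw [hbeq, if_neg (by simp)]
        apply ih (k + 1) _ (by omega) (by simp [hlen])
        · -- processed constraints still hold in the relabelled table
          intro i hi
          have hmap : ∀ x, x < n.toNat →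
              ((comp.map (fun rp =>
                if rp.1 == (comp.getD (pvT n statements k) pvD0).1 then
                  ((comp.getD k pvD0).1,
                    rp.2 != ((comp.getD k pvD0).2
                      != ((comp.getD (pvT n statements k) pvD0).2 != pvP statements k)))
                else rp)).getD x pvD0)
              = (if (comp.getD x pvD0).1 == (comp.getD (pvT n statements k) pvD0).1 then
                  ((comp.getD k pvD0).1,
                    (comp.getD x pvD0).2 != ((comp.getD k pvD0).2
                      != ((comp.getD (pvT n statements k) pvD0).2 != pvP statements k)))
                else comp.getD x pvD0) := by
            intro x hx
            rw [pvGetD_map_of_lt _ comp x (by omega) pvD0 pvD0]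
          rcases Nat.lt_succ_iff_lt_or_eq.mp hi with hi' | heq
          · have h2 := hI2 i hi'
            have hgoodi := h2.1
            obtain ⟨hroots, hpars⟩ := h2.2
            have hiN : i < n.toNat := by omega
            have hti : pvT n statements i < n.toNat := pvT_lt n statements hp hn i hiN
            simp only [pvRoot, pvPar] at hroots hpars
            refine ⟨hgoodi, ?_⟩
            simp only [pvHolds, pvRoot, pvPar]
            rw [hmap i hiN, hmap (pvT n statements i) hti]
            cases hcase : ((comp.getD i pvD0).1 == (comp.getD (pvT n statements k) pvD0).1) with
            | true =>
              have hcase' : ((comp.getD (pvT n statements i) pvD0).1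
                  == (comp.getD (pvT n statements k) pvD0).1) = true := by
                rw [← hroots]; exact hcase
              simp only [hcase, hcase', if_true]
              exact ⟨by trivial, by rw [pvBne4]; exact hpars⟩
            | false =>
              have hcase' : ((comp.getD (pvT n statements i) pvD0).1
                  == (comp.getD (pvT n statements k) pvD0).1) = false := by
                rw [← hroots]; exact hcase
              simp only [hcase, hcase', Bool.false_eq_true, if_false]
              exact ⟨hroots, hpars⟩
          · subst i
            refine ⟨hgood, ?_⟩
            simp only [pvHolds, pvRoot, pvPar]
            rw [hmap k hkN, hmap (pvT n statements k) htk]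
            simp only [hbeq, beq_self_eq_true, Bool.false_eq_true, if_false, if_true]
            exact ⟨by trivial, pvBne5 _ _ _⟩
        · -- compatibility invariant for the relabelled table
          intro c hclen hsat
          have hcompat := hI3 c hclen (fun i hi => hsat i (by omega))
          have hsk := hsat k (by omega)
          unfold pvSatC at hsk
          have hmap : ∀ x, x < n.toNat →
              ((comp.map (fun rp =>
                if rp.1 == (comp.getD (pvT n statements k) pvD0).1 then
                  ((comp.getD k pvD0).1,
                    rp.2 != ((comp.getD k pvD0).2
                      != ((comp.getD (pvT n statements k) pvD0).2 != pvP statements k)))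
                else rp)).getD x pvD0)
              = (if (comp.getD x pvD0).1 == (comp.getD (pvT n statements k) pvD0).1 then
                  ((comp.getD k pvD0).1,
                    (comp.getD x pvD0).2 != ((comp.getD k pvD0).2
                      != ((comp.getD (pvT n statements k) pvD0).2 != pvP statements k)))
                else comp.getD x pvD0) := by
            intro x hx
            rw [pvGetD_map_of_lt _ comp x (by omega) pvD0 pvD0]
          intro x y hx hy hrxy
          simp only [pvRoot, pvPar] at hrxy ⊢
          rw [hmap x hx, hmap y hy] at hrxy ⊢
          cases hax : ((comp.getD x pvD0).1 == (comp.getD (pvT n statements k) pvD0).1) with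
          | true =>
            cases hay : ((comp.getD y pvD0).1 == (comp.getD (pvT n statements k) pvD0).1) with
            | true =>
              simp only [hax, hay, if_true]
              apply pvBne6
              have hrt : (comp.getD x pvD0).1 = (comp.getD (pvT n statements k) pvD0).1 :=
                beq_iff_eq.mp hax
              have hrt' : (comp.getD y pvD0).1 = (comp.getD (pvT n statements k) pvD0).1 :=
                beq_iff_eq.mp hay
              exact hcompat x y hx hy (by unfold pvRoot; rw [hrt, hrt'])
            | false =>
              simp only [hax, hay, if_true, Bool.false_eq_true, if_false] at hrxy ⊢
              have hry : (comp.getD y pvD0).1 = (comp.getD k pvD0).1 := hrxy.symm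
              have h1 := hcompat x (pvT n statements k) hx htk
                (by unfold pvRoot; exact beq_iff_eq.mp hax)
              have h2 := hcompat y k hy hkN (by unfold pvRoot; exact hry)
              simp only [pvPar] at h1 h2
              exact pvBne7 _ _ _ _ _ _ _ _ _ h1 h2 hsk.2
          | false =>
            cases hay : ((comp.getD y pvD0).1 == (comp.getD (pvT n statements k) pvD0).1) with
            | true =>
              simp only [hax, hay, if_true, Bool.false_eq_true, if_false] at hrxy ⊢
              have hrx : (comp.getD x pvD0).1 = (comp.getD k pvD0).1 := hrxy
              have h1 := hcompat y (pvT n statements k) hy htk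
                (by unfold pvRoot; exact beq_iff_eq.mp hay)
              have h2 := hcompat x k hx hkN (by unfold pvRoot; exact hrx)
              simp only [pvPar] at h1 h2
              exact (pvBne7 _ _ _ _ _ _ _ _ _ h1 h2 hsk.2).symm
            | false =>
              simp only [hax, hay, Bool.false_eq_true, if_false] at hrxy ⊢
              exact hcompat x y hx hy hrxy
    · have hH : ((pvSt statements k).2 == "H") = false := by
        simp only [beq_eq_false_iff_ne, ne_eq]
        tauto
      have hD : ((pvSt statements k).2 == "D") = false := by
        simp only [beq_eq_false_iff_ne, ne_eq]
        tauto
      have hmatch : (if ((pvSt statements k).2 == "H") then some false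
          else if ((pvSt statements k).2 == "D") then some true else none)
          = (none : Option Bool) := by
        rw [hH, hD]
        simp
      simp only [hmatch]
      simp only [Bool.false_eq_true, false_iff]
      rintro ⟨c, hclen, hsat⟩
      have := hsat k hkN
      unfold pvSatC pvGood at this
      exact hgood this.1

theorem pvB_iff (n : Int) (statements : List (Int × String))
    (hp : Pre_honest_or_dishonest n statements) (hn : 1 ≤ n) :
    honest_or_dishonest_alt n statements = true ↔ pvSolvable n statements := by
  unfold honest_or_dishonest_alt
  rw [if_neg (show ¬ n < 1 by omega)]
  apply pvBLoop_iff n statements hp hn n.toNat 0 _ (by omega) (by simp)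
  · intro i hi; omega
  · intro c hclen hsat
    intro x y hx hy hroot
    have hroots : ∀ z, z < n.toNat →
        pvRoot ((List.range n.toNat).map (fun i : Nat => ((i : Int), false))) z = (z : Int) := by
      intro z hz
      unfold pvRoot
      rw [pvGetD_map_of_lt (fun i : Nat => ((i : Int), false)) (List.range n.toNat) z
        (by simpa using hz) pvD0 0]
      have h1 : (List.range n.toNat).getD z 0 = z := by
        rw [List.getD_eq_getElem _ _ (by simpa using hz)]
        simp
      rw [h1]
    rw [hroots x hx, hroots y hy] at hroot
    have : x = y := by exact_mod_cast hroot
    subst this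
    rfl

-- ===== VERDICT (by name: the statement is the Claim_ definition above) =====
theorem honest_or_dishonest_spec : Claim_equal_honest_or_dishonest := by
  intro n statements _ hpre
  unfold Spec_honest_or_dishonest
  by_cases hn : 1 ≤ n
  · have hA := pvA_iff n statements hpre hn
    have hB := pvB_iff n statements hpre hn
    cases hA' : honest_or_dishonest n statements <;>
      cases hB' : honest_or_dishonest_alt n statements <;> simp_all
  · have hN : n.toNat = 0 := by omega
    have hlt : n < 1 := by omega
    simp [honest_or_dishonest, honest_or_dishonest_alt, hN, hlt, pvProductHD, pvOuter, pvInner]
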